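-- pv_equiv track=rewrite | github.com/mihainadas/calcgpt | datagen.py | generate_valid_numbers
-- ===== SOURCE A (Python) =====
-- from typing import List, Set, Generator, Tuple
--
-- def contains_only_allowed_digits(number: int, allowed_digits: Set[str]) -> bool:
--     """Check if a number contains only the allowed digits."""
--     return all(digit in allowed_digits for digit in str(number))
--
-- def generate_valid_numbers(max_value: int, allowed_digits: Set[str] = None) -> List[int]:
--     """Generate list of valid numbers based on constraints."""
--     if allowed_digits is None:
--         return list(range(max_value + 1))
--
--     valid_numbers = []
--     for i in range(max_value + 1):
--         if contains_only_allowed_digits(i, allowed_digits):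
--             valid_numbers.append(i)
--
--     return valid_numbers
-- ===== SOURCE B (Python) =====
-- def generate_valid_numbers(max_value, allowed_digits=None):
--     """Generate valid numbers by composing allowed digits level by level
--     (numbers with k+1 digits are built from the k-digit ones), instead of
--     testing every integer in range."""
--     if allowed_digits is None:
--         return list(range(max_value + 1))
--     digit_values = [v for v in range(10) if str(v) in allowed_digits]
--     result = [0] if 0 <= max_value and "0" in allowed_digits else []
--     level = [v for v in digit_values if v != 0 and v <= max_value]
--     for _ in range(len(str(max_value))):
--         result += level
--         level = [10 * n + v for n in level for v in digit_values if 10 * n + v <= max_value]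
--     return result
-- ===== Notes on version B (the rewrite author's own statement) =====
-- stated objective: faster
-- what changed: Instead of testing every integer in [0, max_value] by string-converting it, B builds the valid numbers directly: it composes allowed digits level by level (k+1-digit numbers from k-digit ones), so only valid numbers (plus one pruned frontier) are ever touched.
import Mathlib
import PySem

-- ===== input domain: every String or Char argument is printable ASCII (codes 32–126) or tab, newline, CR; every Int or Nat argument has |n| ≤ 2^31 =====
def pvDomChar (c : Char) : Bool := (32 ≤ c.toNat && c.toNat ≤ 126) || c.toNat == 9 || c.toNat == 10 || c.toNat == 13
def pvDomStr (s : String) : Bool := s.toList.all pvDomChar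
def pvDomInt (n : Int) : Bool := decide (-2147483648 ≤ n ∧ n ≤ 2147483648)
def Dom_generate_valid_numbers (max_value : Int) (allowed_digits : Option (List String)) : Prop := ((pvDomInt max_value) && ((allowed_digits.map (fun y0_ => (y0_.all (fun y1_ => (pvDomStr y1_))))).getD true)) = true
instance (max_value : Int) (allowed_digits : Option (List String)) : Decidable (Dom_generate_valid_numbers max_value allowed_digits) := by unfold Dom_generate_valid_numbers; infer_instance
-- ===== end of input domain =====

-- B replaces A's scan of every integer in [0, max_value] by composing the valid
-- numbers digit by digit, level by level (faster: only valid numbers are touched).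

-- ===== PORT A =====
-- all(digit in allowed_digits for digit in str(number))
def contains_only_allowed_digits (number : Int) (allowed_digits : List String) : Bool :=
  (PySem.Int.toChars number).all (fun c => allowed_digits.contains (String.ofList [c]))

def generate_valid_numbers (max_value : Int) (allowed_digits : Option (List String)) : List Int :=
  match allowed_digits with
  | none => PySem.List.pyRange 0 (max_value + 1) 1
  | some allowed =>
      (PySem.List.pyRange 0 (max_value + 1) 1).foldl
        (fun valid_numbers i =>
          if contains_only_allowed_digits i allowed then valid_numbers ++ [i] else valid_numbers)
        []

-- ===== PORT B =====
-- digit_values = [v for v in range(10) if str(v) in allowed_digits]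
def gvn_digit_values (allowed_digits : List String) : List Int :=
  (PySem.List.pyRange 0 10 1).filter (fun v => allowed_digits.contains (PySem.Int.toStr v))

-- [10*n + v for n in level for v in digit_values if 10*n + v <= max_value]
def gvn_extend (max_value : Int) (digit_values : List Int) (level : List Int) : List Int :=
  level.flatMap (fun n =>
    digit_values.filterMap (fun v =>
      if 10 * n + v ≤ max_value then some (10 * n + v) else none))

def generate_valid_numbers_alt (max_value : Int) (allowed_digits : Option (List String)) : List Int :=
  match allowed_digits with
  | none => PySem.List.pyRange 0 (max_value + 1) 1
  | some allowed =>
      let digit_values := gvn_digit_values allowed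
      let result0 : List Int := if 0 ≤ max_value ∧ allowed.contains "0" then [0] else []
      let level0 := digit_values.filter (fun v => decide (v ≠ 0) && decide (v ≤ max_value))
      -- for _ in range(len(str(max_value))):  (len(str(m)) = (PySem.Int.toChars m).length, exact)
      ((List.range (PySem.Int.toChars max_value).length).foldl
        (fun st _ => (st.1 ++ st.2, gvn_extend max_value digit_values st.2))
        (result0, level0)).1

-- ===== PRECONDITION & SPEC =====
def Spec_generate_valid_numbers (max_value : Int) (allowed_digits : Option (List String)) (out : List Int) : Prop := out = generate_valid_numbers_alt max_value allowed_digits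
instance (max_value : Int) (allowed_digits : Option (List String)) (out : List Int) : Decidable (Spec_generate_valid_numbers max_value allowed_digits out) := by unfold Spec_generate_valid_numbers; infer_instance

-- ===== CLAIM (what is proved, stated in full; the proofs are below) =====
def Claim_equal_generate_valid_numbers : Prop := ∀ (max_value : Int) (allowed_digits : Option (List String)), Dom_generate_valid_numbers max_value allowed_digits → Spec_generate_valid_numbers max_value allowed_digits (generate_valid_numbers max_value allowed_digits)

-- ===== LEMMAS AND PROOFS =====

-- digit d (as the one-character string Python iterates over) is in the allowed set
def pvOkd (allowed : List String) (d : Nat) : Bool := allowed.contains (String.ofList [Nat.digitChar d])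

-- "valid and still within the bound" — the predicate B's frontier levels live under
def pvQ (allowed : List String) (max_value n : Int) : Bool :=
  contains_only_allowed_digits n allowed && decide (n ≤ max_value)

theorem pv_toDigitsCore_eq (f : Nat) : ∀ (n : Nat) (l : List Char), 0 < n → n < f →
    Nat.toDigitsCore 10 f n l = ((Nat.digits 10 n).map Nat.digitChar).reverse ++ l := by
  induction f with
  | zero => intro n l hn hf; omega
  | succ f ih =>
    intro n l hn hf
    rw [Nat.toDigitsCore]
    by_cases h : n / 10 = 0
    · rw [if_pos h, Nat.digits_def' (by norm_num : (1:ℕ) < 10) hn, h]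
      simp
    · rw [if_neg h, ih (n / 10) _ (Nat.pos_of_ne_zero h) (by omega),
        Nat.digits_def' (by norm_num : (1:ℕ) < 10) hn]
      simp

theorem pv_toDigits_eq (n : Nat) (hn : 0 < n) :
    Nat.toDigits 10 n = ((Nat.digits 10 n).map Nat.digitChar).reverse := by
  rw [Nat.toDigits, pv_toDigitsCore_eq (n+1) n [] hn (by omega)]
  simp


theorem pv_okn_pos (allowed : List String) (n : Nat) (hn : 0 < n) :
    contains_only_allowed_digits (n : Int) allowed = (Nat.digits 10 n).all (pvOkd allowed) := by
  rw [contains_only_allowed_digits, PySem.Int.toChars]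
  rw [if_neg (by omega)]
  simp only [Int.toNat_natCast]
  rw [pv_toDigits_eq n hn, List.all_reverse, List.all_map]
  rfl

theorem pv_okn_zero (allowed : List String) :
    contains_only_allowed_digits 0 allowed = allowed.contains "0" := by
  simp [contains_only_allowed_digits, PySem.Int.toChars]

theorem pv_okn_step (allowed : List String) (n v : Int) (hn : 1 ≤ n) (hv0 : 0 ≤ v) (hv : v < 10) :
    contains_only_allowed_digits (10 * n + v) allowed =
      (pvOkd allowed v.toNat && contains_only_allowed_digits n allowed) := by
  obtain ⟨m, rfl⟩ : ∃ m : Nat, n = (m : Int) := ⟨n.toNat, by omega⟩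
  obtain ⟨w, rfl⟩ : ∃ w : Nat, v = (w : Int) := ⟨v.toNat, by omega⟩
  have h1 : ((10 * m + w : Nat) : Int) = 10 * (m : Int) + (w : Int) := by push_cast; ring
  rw [← h1, pv_okn_pos allowed _ (by omega), pv_okn_pos allowed m (by omega)]
  rw [Nat.digits_def' (by norm_num : (1:ℕ) < 10) (by omega)]
  have h2 : (10 * m + w) % 10 = w := by omega
  have h3 : (10 * m + w) / 10 = m := by omega
  rw [h2, h3, List.all_cons, Int.toNat_natCast]

theorem pv_okn_single (allowed : List String) (v : Int) (hv0 : 1 ≤ v) (hv : v < 10) :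
    contains_only_allowed_digits v allowed = pvOkd allowed v.toNat := by
  obtain ⟨w, rfl⟩ : ∃ w : Nat, v = (w : Int) := ⟨v.toNat, by omega⟩
  rw [pv_okn_pos allowed _ (by omega)]
  rw [Nat.digits_def' (by norm_num : (1:ℕ) < 10) (by omega)]
  rw [Nat.div_eq_of_lt (by omega), Nat.digits_zero, Nat.mod_eq_of_lt (by omega)]
  simp

theorem pv_range_split (a b : Int) :
    PySem.List.pyRange (10 * a) (10 * b) 1 =
      (PySem.List.pyRange a b 1).flatMap (fun n => PySem.List.pyRange (10 * n) (10 * n + 10) 1) := by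
  by_cases hab : b ≤ a
  · rw [PySem.List.pyRange_one_eq_nil hab, PySem.List.pyRange_one_eq_nil (by omega)]
    rfl
  · obtain ⟨k, hk⟩ : ∃ k : Nat, b - a = (k : Int) := ⟨(b - a).toNat, by omega⟩
    clear hab
    induction k generalizing a with
    | zero =>
        rw [PySem.List.pyRange_one_eq_nil (by omega), PySem.List.pyRange_one_eq_nil (by omega)]
        rfl
    | succ k ih =>
        rw [PySem.List.pyRange_one_cons (show a < b by omega), List.flatMap_cons,
          ← ih (a + 1) (by omega), show 10 * (a + 1) = 10 * a + 10 from by ring,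
          ← PySem.List.pyRange_one_append (10 * a) (10 * a + 10) (10 * b) (by omega) (by omega)]

theorem pv_flatMap_if {α β : Type} (l : List α) (p : α → Bool) (f : α → List β) :
    (l.flatMap fun n => if p n then f n else []) = (l.filter p).flatMap f := by
  induction l with
  | nil => rfl
  | cons x xs ih =>
      rw [List.flatMap_cons, List.filter_cons]
      by_cases h : p x
      · rw [if_pos h, if_pos h, List.flatMap_cons, ih]
      · rw [if_neg h, if_neg h, ih]; rfl

theorem pv_filter_cap (allowed : List String) (max_value a b : Int) :
    (PySem.List.pyRange a b 1).filter (pvQ allowed max_value) =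
      (PySem.List.pyRange a (min b (max_value + 1)) 1).filter
        (fun n => contains_only_allowed_digits n allowed) := by
  by_cases hb : b ≤ max_value + 1
  · rw [min_eq_left hb]
    apply List.filter_congr
    intro x hx
    rw [PySem.List.mem_pyRange_one] at hx
    simp [pvQ, show x ≤ max_value by omega]
  · rw [min_eq_right (by omega)]
    by_cases ha : a ≤ max_value + 1
    · rw [PySem.List.pyRange_one_append a (max_value + 1) b ha (by omega), List.filter_append]
      have h2 : (PySem.List.pyRange (max_value + 1) b 1).filter (pvQ allowed max_value) = [] := by
        rw [List.filter_eq_nil_iff]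
        intro x hx
        rw [PySem.List.mem_pyRange_one] at hx
        simp [pvQ, show ¬ (x ≤ max_value) by omega]
      rw [h2, List.append_nil]
      apply List.filter_congr
      intro x hx
      rw [PySem.List.mem_pyRange_one] at hx
      simp [pvQ, show x ≤ max_value by omega]
    · rw [PySem.List.pyRange_one_eq_nil (show max_value + 1 ≤ a by omega), List.filter_nil,
        List.filter_eq_nil_iff]
      intro x hx
      rw [PySem.List.mem_pyRange_one] at hx
      simp [pvQ, show ¬ (x ≤ max_value) by omega]

theorem pv_zip (allowed : List String) (max_value n : Int) (ds : List Int)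
    (hd : ∀ v ∈ ds, allowed.contains (PySem.Int.toStr v) = pvOkd allowed v.toNat ∧
      pvQ allowed max_value (10 * n + v) = (pvOkd allowed v.toNat && decide (10 * n + v ≤ max_value))) :
    (ds.map (fun v => 10 * n + v)).filter (pvQ allowed max_value) =
      (ds.filter (fun v => allowed.contains (PySem.Int.toStr v))).filterMap
        (fun v => if 10 * n + v ≤ max_value then some (10 * n + v) else none) := by
  induction ds with
  | nil => rfl
  | cons v t ih =>
      obtain ⟨h1, h2⟩ := hd v (List.mem_cons_self ..)
      have iht := ih (fun w hw => hd w (List.mem_cons_of_mem _ hw))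
      rw [List.map_cons, List.filter_cons, List.filter_cons, h2, h1]
      cases hc : pvOkd allowed v.toNat with
      | false => simpa using iht
      | true =>
          rw [Bool.true_and, if_pos rfl, List.filterMap_cons]
          by_cases hb : 10 * n + v ≤ max_value
          · rw [if_pos (by simpa using hb), if_pos hb, iht]
          · rw [if_neg (by simpa using hb), if_neg hb]
            exact iht

theorem pv_block (allowed : List String) (max_value n : Int) (hn : 1 ≤ n) :
    (PySem.List.pyRange (10 * n) (10 * n + 10) 1).filter (pvQ allowed max_value) =
      if pvQ allowed max_value n then
        (gvn_digit_values allowed).filterMap (fun v =>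
          if 10 * n + v ≤ max_value then some (10 * n + v) else none)
      else [] := by
  have hrange : PySem.List.pyRange (10 * n) (10 * n + 10) 1 =
      (PySem.List.pyRange 0 10 1).map (fun v => 10 * n + v) := by
    rw [PySem.List.pyRange_one, PySem.List.pyRange_one]
    rw [show 10 * n + 10 - 10 * n = 10 - 0 from by ring]
    rw [List.map_map]
    exact List.map_congr_left (fun k _ => by simp)
  cases hq : pvQ allowed max_value n with
  | true =>
      have hok : contains_only_allowed_digits n allowed = true := by
        have := hq; unfold pvQ at this; exact (Bool.and_eq_true_iff.mp this).1
      rw [if_pos rfl, hrange, gvn_digit_values]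
      apply pv_zip
      intro v hv
      rw [PySem.List.mem_pyRange_one] at hv
      obtain ⟨hv1, hv2⟩ := hv
      constructor
      · -- contains (toStr v) = pvOkd v.toNat, v ∈ [0,10)
        interval_cases v <;> rfl
      · rw [pvQ, pv_okn_step allowed n v hn (by omega) (by omega), hok, Bool.and_true]
  | false =>
      rw [if_neg (by simp), List.filter_eq_nil_iff]
      intro x hx
      rw [hrange] at hx
      obtain ⟨v, hv, rfl⟩ := List.mem_map.mp hx
      rw [PySem.List.mem_pyRange_one] at hv
      rw [pvQ, pv_okn_step allowed n v hn (by omega) (by omega)]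
      unfold pvQ at hq
      rcases Bool.and_eq_false_iff.mp hq with h | h
      · simp [h]
      · have : ¬ (10 * n + v ≤ max_value) := by
          have := of_decide_eq_false h; omega
        simp [this]

theorem pv_extend_eq (allowed : List String) (max_value : Int) (t : Nat) :
    gvn_extend max_value (gvn_digit_values allowed)
        ((PySem.List.pyRange (10 ^ t) (10 ^ (t + 1)) 1).filter (pvQ allowed max_value)) =
      (PySem.List.pyRange (10 ^ (t + 1)) (10 ^ (t + 2)) 1).filter (pvQ allowed max_value) := by
  have hp : (1 : Int) ≤ 10 ^ t := one_le_pow₀ (by norm_num)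
  rw [show (10 : Int) ^ (t + 1) = 10 * 10 ^ t from by ring,
      show (10 : Int) ^ (t + 2) = 10 * (10 * 10 ^ t) from by ring]
  rw [pv_range_split (10 ^ t) (10 * 10 ^ t)]
  rw [List.filter_flatMap]
  rw [List.flatMap_congr (g := fun n => if pvQ allowed max_value n then
        (gvn_digit_values allowed).filterMap (fun v =>
          if 10 * n + v ≤ max_value then some (10 * n + v) else none) else [])
      (fun n hn => pv_block allowed max_value n
        (by rw [PySem.List.mem_pyRange_one] at hn; omega))]
  rw [pv_flatMap_if]
  rfl

theorem pv_result_eq (allowed : List String) (max_value : Int) (t : Nat) :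
    (PySem.List.pyRange 0 (min (10 ^ t) (max_value + 1)) 1).filter
        (fun n => contains_only_allowed_digits n allowed) ++
      (PySem.List.pyRange (10 ^ t) (10 ^ (t + 1)) 1).filter (pvQ allowed max_value) =
    (PySem.List.pyRange 0 (min (10 ^ (t + 1)) (max_value + 1)) 1).filter
        (fun n => contains_only_allowed_digits n allowed) := by
  have hp : (1 : Int) ≤ 10 ^ t := one_le_pow₀ (by norm_num)
  have hpp : (10 : Int) ^ t ≤ 10 ^ (t + 1) := by
    rw [show (10 : Int) ^ (t + 1) = 10 * 10 ^ t from by ring]; omega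
  rw [pv_filter_cap]
  by_cases hm : max_value + 1 ≤ 10 ^ t
  · rw [min_eq_right hm, min_eq_right (by omega),
      PySem.List.pyRange_one_eq_nil (show max_value + 1 ≤ (10 : Int) ^ t from hm),
      List.filter_nil, List.append_nil]
  · rw [min_eq_left (by omega), ← List.filter_append,
      ← PySem.List.pyRange_one_append 0 (10 ^ t) (min (10 ^ (t + 1)) (max_value + 1)) (by omega) (by omega)]

theorem pv_base_result (allowed : List String) (max_value : Int) :
    (if 0 ≤ max_value ∧ allowed.contains "0" then ([0] : List Int) else []) =
      (PySem.List.pyRange 0 (min ((10 : Int) ^ (0 : Nat)) (max_value + 1)) 1).filter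
        (fun n => contains_only_allowed_digits n allowed) := by
  by_cases hm : 0 ≤ max_value
  · rw [min_eq_left (by omega), pow_zero,
      show PySem.List.pyRange 0 1 1 = [0] from rfl]
    rw [List.filter_cons, List.filter_nil, pv_okn_zero]
    by_cases hc : allowed.contains "0"
    · rw [if_pos ⟨hm, hc⟩, if_pos hc]
    · rw [if_neg (by tauto), if_neg (by simpa using hc)]
  · rw [min_eq_right (by omega), PySem.List.pyRange_one_eq_nil (by omega), List.filter_nil,
      if_neg (by tauto)]

theorem pv_base_level (allowed : List String) (max_value : Int) :
    (gvn_digit_values allowed).filter (fun v => decide (v ≠ 0) && decide (v ≤ max_value)) =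
      (PySem.List.pyRange ((10 : Int) ^ (0 : Nat)) (10 ^ (0 + 1 : Nat)) 1).filter
        (pvQ allowed max_value) := by
  rw [gvn_digit_values, List.filter_filter, pow_zero, pow_one]
  rw [show PySem.List.pyRange 0 10 1 = 0 :: PySem.List.pyRange 1 10 1 from rfl]
  rw [List.filter_cons]
  rw [if_neg (by simp)]
  apply List.filter_congr
  intro x hx
  rw [PySem.List.mem_pyRange_one] at hx
  obtain ⟨hx1, hx2⟩ := hx
  rw [pvQ, pv_okn_single allowed x hx1 hx2]
  have h1 : allowed.contains (PySem.Int.toStr x) = pvOkd allowed x.toNat := by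
    interval_cases x <;> rfl
  rw [h1]
  simp [show x ≠ 0 from by omega]
  rw [Bool.and_comm]

theorem pv_fold_inv (allowed : List String) (max_value : Int) (D : Nat) :
    (List.range D).foldl
        (fun st _ => (st.1 ++ st.2, gvn_extend max_value (gvn_digit_values allowed) st.2))
        ((if 0 ≤ max_value ∧ allowed.contains "0" then ([0] : List Int) else []),
         (gvn_digit_values allowed).filter (fun v => decide (v ≠ 0) && decide (v ≤ max_value))) =
      ((PySem.List.pyRange 0 (min (10 ^ D) (max_value + 1)) 1).filter
          (fun n => contains_only_allowed_digits n allowed),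
       (PySem.List.pyRange (10 ^ D) (10 ^ (D + 1)) 1).filter (pvQ allowed max_value)) := by
  induction D with
  | zero =>
      rw [List.range_zero, List.foldl_nil, pv_base_result allowed max_value, pv_base_level allowed max_value]
  | succ D ih =>
      rw [List.range_succ, List.foldl_append, ih, List.foldl_cons, List.foldl_nil]
      exact Prod.ext (pv_result_eq allowed max_value D) (pv_extend_eq allowed max_value D)

theorem pv_len_pow (max_value : Int) :
    min ((10 : Int) ^ (PySem.Int.toChars max_value).length) (max_value + 1) = max_value + 1 := by
  apply min_eq_right
  by_cases hm : 0 ≤ max_value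
  · rw [PySem.Int.toChars, if_neg (by omega)]
    by_cases h0 : max_value.toNat = 0
    · have : max_value = 0 := by omega
      subst this
      norm_num
    · have hlen : (Nat.toDigits 10 max_value.toNat).length = (Nat.digits 10 max_value.toNat).length := by
        rw [pv_toDigits_eq _ (Nat.pos_of_ne_zero h0)]; simp
      rw [hlen]
      have h1 := Nat.lt_base_pow_length_digits (b := 10) (m := max_value.toNat) (by norm_num)
      have h2 : (max_value.toNat : Int) < (10 : Int) ^ (Nat.digits 10 max_value.toNat).length := by
        exact_mod_cast h1
      omega
  · have : (0 : Int) < 10 ^ (PySem.Int.toChars max_value).length := pow_pos (by norm_num) _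
    omega

-- ===== VERDICT (by name: the statement is the Claim_ definition above) =====
theorem generate_valid_numbers_spec : Claim_equal_generate_valid_numbers := by
  intro max_value allowed_digits _
  unfold Spec_generate_valid_numbers
  cases allowed_digits with
  | none => rfl
  | some allowed =>
      have hB : generate_valid_numbers_alt max_value (some allowed) =
          (PySem.List.pyRange 0 (max_value + 1) 1).filter
            (fun n => contains_only_allowed_digits n allowed) := by
        show ((List.range (PySem.Int.toChars max_value).length).foldl
            (fun st _ => (st.1 ++ st.2, gvn_extend max_value (gvn_digit_values allowed) st.2))
            ((if 0 ≤ max_value ∧ allowed.contains "0" then ([0] : List Int) else []),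
             (gvn_digit_values allowed).filter
               (fun v => decide (v ≠ 0) && decide (v ≤ max_value)))).1 = _
        rw [pv_fold_inv allowed max_value (PySem.Int.toChars max_value).length, pv_len_pow]
      have hA : generate_valid_numbers max_value (some allowed) =
          (PySem.List.pyRange 0 (max_value + 1) 1).filter
            (fun n => contains_only_allowed_digits n allowed) := by
        show List.foldl _ [] _ = _
        simpa using PySem.List.foldl_append_if
          (fun i => contains_only_allowed_digits i allowed) (fun i => i)
          (PySem.List.pyRange 0 (max_value + 1) 1) []
      exact hA.trans hB.symm
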